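-- pv_equiv track=rewrite | github.com/jsean662/scrappers-1 | selenium/whatsapp/whatsapp/spiders/rake_wt_nltk.py | _join_bhks
-- ===== SOURCE A (Python) =====
-- def isNumeric(word):
--   try:
--     float(word) if '.' in word else int(word)
--     return True
--   except ValueError:
--     return False
--
-- def _join_bhks(phrase_list):
--   no_list = ['one','two','three','four','five','six','seven','eight','nine','ten']
--   make_bhk = []
--   for phrase in phrase_list:
--     make_bhk_list = []
--     num_list = ''
--     for num,item in enumerate(phrase):
--       if (len(item)==1 and isNumeric(item)) or ('.' in item and len(item)==3) or (item in no_list):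
--         num_list = item
--       else:
--         make_bhk_list.append(num_list+item)
--         num_list = ''
--     make_bhk.append(make_bhk_list)
--   return make_bhk
-- ===== SOURCE B (Python) =====
-- def isNumeric(word):
--   try:
--     float(word) if '.' in word else int(word)
--     return True
--   except ValueError:
--     return False
--
-- def _join_bhks(phrase_list):
--   no_list = ['one','two','three','four','five','six','seven','eight','nine','ten']
--   def is_marker(item):
--     return (len(item)==1 and isNumeric(item)) or ('.' in item and len(item)==3) or (item in no_list)
--   return [[(prev if is_marker(prev) else '') + cur
--            for prev, cur in zip([''] + phrase, phrase)
--            if not is_marker(cur)]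
--           for phrase in phrase_list]
-- ===== Notes on version B (the rewrite author's own statement) =====
-- stated objective: simpler
-- what changed: Replaces the stateful num_list accumulator loop with a stateless zip-of-adjacent-tokens comprehension: each non-marker token takes its immediately preceding token as prefix iff that neighbour is a marker.
import Mathlib
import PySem

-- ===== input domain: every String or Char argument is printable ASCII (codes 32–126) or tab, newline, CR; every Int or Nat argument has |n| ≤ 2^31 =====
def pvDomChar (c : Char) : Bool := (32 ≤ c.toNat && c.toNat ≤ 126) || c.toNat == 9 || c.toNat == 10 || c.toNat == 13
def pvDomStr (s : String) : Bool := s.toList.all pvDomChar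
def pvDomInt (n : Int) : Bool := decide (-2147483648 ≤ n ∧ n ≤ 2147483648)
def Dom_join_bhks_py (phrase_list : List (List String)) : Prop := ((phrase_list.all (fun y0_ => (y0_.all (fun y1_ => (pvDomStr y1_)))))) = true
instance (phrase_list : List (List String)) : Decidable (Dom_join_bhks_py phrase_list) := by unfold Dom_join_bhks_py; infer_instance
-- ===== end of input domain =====

-- B replaces A's forward-carried num_list accumulator with a stateless comprehension over
-- zip([''] + phrase, phrase): same values, simpler decomposition (no speed claim).

-- ===== PORT A =====
-- isNumeric(word): the float(word) branch ('.' in word) is reached by _join_bhks only for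
-- length-1 words, i.e. word = ".", where float(".") raises ValueError → False; exact there.
def isNumericPy (word : String) : Bool :=
  if PySem.Str.isIn "." word then false
  else (PySem.Int.ofStr? word).isSome

def pyNoList : List String :=
  ["one","two","three","four","five","six","seven","eight","nine","ten"]

def join_bhks_py (phrase_list : List (List String)) : List (List String) :=
  phrase_list.foldl (fun make_bhk phrase =>
    let st := (PySem.List.enumerate phrase 0).foldl
      (fun (st : List String × String) ni =>
        let item := ni.2
        if (PySem.Str.len item == 1 && isNumericPy item)
            || (PySem.Str.isIn "." item && PySem.Str.len item == 3)
            || pyNoList.contains item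
        then (st.1, item)
        else (st.1 ++ [st.2 ++ item], ""))
      ([], "")
    make_bhk ++ [st.1]) []

-- ===== PORT B =====
def isMarkerB (item : String) : Bool :=
  (PySem.Str.len item == 1 && isNumericPy item)
    || (PySem.Str.isIn "." item && PySem.Str.len item == 3)
    || pyNoList.contains item

def join_bhks_py_alt (phrase_list : List (List String)) : List (List String) :=
  phrase_list.map (fun phrase =>
    ((("" :: phrase).zip phrase).filter (fun pc => !isMarkerB pc.2)).map
      (fun pc => (if isMarkerB pc.1 then pc.1 else "") ++ pc.2))

-- ===== PRECONDITION & SPEC =====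
def Spec_join_bhks_py (phrase_list : List (List String)) (out : List (List String)) : Prop := out = join_bhks_py_alt phrase_list
instance (phrase_list : List (List String)) (out : List (List String)) : Decidable (Spec_join_bhks_py phrase_list out) := by unfold Spec_join_bhks_py; infer_instance

-- ===== CLAIM (what is proved, stated in full; the proofs are below) =====
def Claim_equal_join_bhks_py : Prop := ∀ (phrase_list : List (List String)), Dom_join_bhks_py phrase_list → Spec_join_bhks_py phrase_list (join_bhks_py phrase_list)

-- ===== LEMMAS AND PROOFS =====

-- B's per-phrase comprehension, written with an explicit 'previous token' parameter.
def bPhrase (prev : String) (xs : List String) : List String :=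
  (((prev :: xs).zip xs).filter (fun pc => !isMarkerB pc.2)).map
    (fun pc => (if isMarkerB pc.1 then pc.1 else "") ++ pc.2)

lemma bPhrase_cons (prev x : String) (xs : List String) :
    bPhrase prev (x :: xs) =
      (if isMarkerB x then [] else [(if isMarkerB prev then prev else "") ++ x]) ++ bPhrase x xs := by
  by_cases h : isMarkerB x <;> simp [bPhrase, h]

-- A's inner loop body, index dropped (the index is unused by A's body).
def aStep (st : List String × String) (item : String) : List String × String :=
  if isMarkerB item then (st.1, item) else (st.1 ++ [st.2 ++ item], "")

lemma enum_foldl_eq (xs : List String) : ∀ (n : Int) (st : List String × String),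
    (PySem.List.enumerate xs n).foldl
      (fun (st : List String × String) ni =>
        let item := ni.2
        if (PySem.Str.len item == 1 && isNumericPy item)
            || (PySem.Str.isIn "." item && PySem.Str.len item == 3)
            || pyNoList.contains item
        then (st.1, item)
        else (st.1 ++ [st.2 ++ item], "")) st
      = xs.foldl aStep st := by
  induction xs with
  | nil => intro n st; simp [PySem.List.enumerate]
  | cons x xs ih =>
    intro n st
    rw [show PySem.List.enumerate (x :: xs) n = (n, x) :: PySem.List.enumerate xs (n + 1) from
      by simp [PySem.List.enumerate]]
    rw [List.foldl_cons, List.foldl_cons, ih]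
    rfl

lemma loopA_eq : ∀ (xs acc : List String) (nl prev : String),
    nl = (if isMarkerB prev then prev else "") →
    (xs.foldl aStep (acc, nl)).1 = acc ++ bPhrase prev xs := by
  intro xs
  induction xs with
  | nil => intro acc nl prev _; simp [bPhrase]
  | cons x xs ih =>
    intro acc nl prev hnl
    by_cases h : isMarkerB x
    · rw [List.foldl_cons, show aStep (acc, nl) x = (acc, x) by simp [aStep, h],
        ih acc x x (by simp [h]), bPhrase_cons]
      simp [h]
    · rw [List.foldl_cons, show aStep (acc, nl) x = (acc ++ [nl ++ x], "") by simp [aStep, h],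
        ih (acc ++ [nl ++ x]) "" x (by simp [h]), bPhrase_cons]
      simp [h, hnl]

-- ===== VERDICT (by name: the statement is the Claim_ definition above) =====
theorem join_bhks_py_spec : Claim_equal_join_bhks_py := by
  intro phrase_list _
  show join_bhks_py phrase_list = join_bhks_py_alt phrase_list
  unfold join_bhks_py join_bhks_py_alt
  rw [PySem.List.foldl_append_singleton_eq_map]
  simp only [List.nil_append]
  apply List.map_congr_left
  intro phrase _
  rw [enum_foldl_eq, loopA_eq phrase [] "" "" (by decide)]
  simp [bPhrase]
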